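-- pv_equiv track=rewrite | github.com/Bouzomgi/Rust-Unsafe-Analyzer | rustUnsafeAnalyzer.py | moveKeyworkToBack
-- ===== SOURCE A (Python) =====
-- def moveKeyworkToBack(inputList):
-- 	keywords = ['Deref', 'Ptr']
--
-- 	iterations = len(inputList)
-- 	i = 0
--
-- 	while i < iterations:
-- 		if inputList[i] in keywords:
-- 			inputList.append(inputList.pop(i))
-- 			iterations -= 1
--
-- 		else:
-- 			i += 1
--
-- 	return inputList
-- ===== SOURCE B (Python) =====
-- def moveKeyworkToBack(inputList):
-- 	keywords = ('Deref', 'Ptr')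
-- 	nonKw = [x for x in inputList if x not in keywords]
-- 	kw = [x for x in inputList if x in keywords]
-- 	inputList[:] = nonKw + kw
-- 	return inputList
-- ===== Notes on version B (the rewrite author's own statement) =====
-- stated objective: simpler
-- what changed: Replaced the in-place while loop with index bookkeeping and repeated pop/append by a stable partition built from two filters (non-keywords then keywords); quadratic pop-shifting only occurs on keyword-heavy inputs, so no speed is claimed.
import Mathlib
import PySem

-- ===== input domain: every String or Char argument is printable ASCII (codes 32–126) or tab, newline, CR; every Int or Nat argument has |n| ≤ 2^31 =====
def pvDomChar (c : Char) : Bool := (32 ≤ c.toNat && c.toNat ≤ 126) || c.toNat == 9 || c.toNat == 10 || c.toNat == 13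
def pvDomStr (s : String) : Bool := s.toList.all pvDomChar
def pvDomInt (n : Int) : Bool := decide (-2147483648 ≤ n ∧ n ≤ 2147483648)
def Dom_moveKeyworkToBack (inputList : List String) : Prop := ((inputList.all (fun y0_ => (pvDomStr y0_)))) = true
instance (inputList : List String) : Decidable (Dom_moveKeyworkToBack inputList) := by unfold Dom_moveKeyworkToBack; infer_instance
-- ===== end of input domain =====

-- B replaces A's in-place while loop with repeated pop/append by one stable two-filter
-- partition (non-keywords first, then keywords); objective: simpler. A mutates its argument
-- in place; B performs the equivalent in-place update, and the theorems here are about the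
-- return value.

-- ===== PORT A =====
-- the while loop of A: state is the (mutated) list, index i and the shrinking bound `iterations`
def loopA (lst : List String) (i iterations : Nat) : List String :=
  if _h : i < iterations then
    match PySem.List.pyGet? lst (i : Int) with            -- inputList[i]
    | none => lst                                          -- unreachable IndexError guard
    | some x =>
      if x ∈ (["Deref", "Ptr"] : List String) then
        match PySem.List.pop? lst (i : Int) with           -- inputList.pop(i)
        | none => lst                                      -- unreachable IndexError guard
        | some (v, rest) => loopA (rest ++ [v]) i (iterations - 1)
      else
        loopA lst (i + 1) iterations
  else lst
termination_by iterations - i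
decreasing_by all_goals omega

def moveKeyworkToBack (inputList : List String) : List String :=
  loopA inputList 0 inputList.length

-- ===== PORT B =====
def kwB (x : String) : Bool := x == "Deref" || x == "Ptr"

def moveKeyworkToBack_alt (inputList : List String) : List String :=
  inputList.filter (fun x => !kwB x) ++ inputList.filter kwB

-- ===== PRECONDITION & SPEC =====
def Spec_moveKeyworkToBack (inputList : List String) (out : List String) : Prop := out = moveKeyworkToBack_alt inputList
instance (inputList : List String) (out : List String) : Decidable (Spec_moveKeyworkToBack inputList out) := by unfold Spec_moveKeyworkToBack; infer_instance

-- ===== CLAIM (what is proved, stated in full; the proofs are below) =====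
def Claim_equal_moveKeyworkToBack : Prop := ∀ (inputList : List String), Dom_moveKeyworkToBack inputList → Spec_moveKeyworkToBack inputList (moveKeyworkToBack inputList)

-- ===== LEMMAS AND PROOFS =====

lemma kwB_iff (x : String) : kwB x = true ↔ x ∈ (["Deref", "Ptr"] : List String) := by
  simp [kwB]

-- Loop invariant: the list is body ++ K where K holds the keywords already moved to the back,
-- i ≤ body.length = iterations, and the first i entries of body are non-keywords already passed.
lemma loopA_spec (n : Nat) (body K : List String) (i : Nat)
    (hle : i ≤ body.length) (hn : n = body.length - i) :
    loopA (body ++ K) i body.length =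
      body.take i ++ (body.drop i).filter (fun x => !kwB x) ++ K ++ (body.drop i).filter kwB := by
  induction n generalizing body K i with
  | zero =>
    have hi : i = body.length := by omega
    subst hi
    rw [loopA]
    simp
  | succ n ih =>
    have hi : i < body.length := by omega
    rw [loopA]
    rw [dif_pos hi]
    have hget : PySem.List.pyGet? (body ++ K) (i : Int) = some body[i] := by
      rw [PySem.List.pyGet?_natCast]
      rw [List.getElem?_append_left hi]
      simp [hi]
    rw [hget]
    dsimp only
    by_cases hkw : body[i] ∈ (["Deref", "Ptr"] : List String)
    · rw [if_pos hkw]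
      have hlen : i < (body ++ K).length := by simp; omega
      have hpop : PySem.List.pop? (body ++ K) (i : Int)
          = some ((body ++ K)[i]'hlen, (body ++ K).eraseIdx i) := by
        exact PySem.List.pop?_natCast _ i hlen
      have hgi : (body ++ K)[i]'hlen = body[i] := by
        rw [List.getElem_append_left hi]
      have herase : (body ++ K).eraseIdx i = body.eraseIdx i ++ K :=
        List.eraseIdx_append_of_lt_length hi K
      rw [hpop, hgi, herase]
      dsimp only
      have hlen' : (body.eraseIdx i).length = body.length - 1 := by
        rw [List.length_eraseIdx_of_lt hi]
      have hstep : body.eraseIdx i ++ K ++ [body[i]] = body.eraseIdx i ++ (K ++ [body[i]]) := by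
        simp
      rw [hstep]
      have := ih (body.eraseIdx i) (K ++ [body[i]]) i (by omega) (by omega)
      rw [hlen'] at this
      rw [this]
      -- rewrite eraseIdx pieces back in terms of body
      have htake : (body.eraseIdx i).take i = body.take i := by
        rw [List.eraseIdx_eq_take_drop_succ]
        rw [List.take_append_of_le_length (by simp only [List.length_take]; omega)]
        simp
      have hdrop : (body.eraseIdx i).drop i = body.drop (i + 1) := by
        rw [List.eraseIdx_eq_take_drop_succ]
        rw [List.drop_append_of_le_length (by simp only [List.length_take]; omega)]
        simp
      have hdropi : body.drop i = body[i] :: body.drop (i + 1) :=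
        List.drop_eq_getElem_cons hi
      have hkwb : kwB body[i] = true := (kwB_iff _).mpr hkw
      rw [htake, hdrop, hdropi]
      simp only [List.filter_cons, hkwb, Bool.not_true, if_neg Bool.false_ne_true]
      simp
    · rw [if_neg hkw]
      have := ih body K (i + 1) (by omega) (by omega)
      rw [this]
      have hdropi : body.drop i = body[i] :: body.drop (i + 1) :=
        List.drop_eq_getElem_cons hi
      have htake : body.take (i + 1) = body.take i ++ [body[i]] := by
        rw [List.take_add_one, List.getElem?_eq_getElem hi]
        rfl
      have hkwb : kwB body[i] = false := by
        rw [Bool.eq_false_iff]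
        intro h
        exact hkw ((kwB_iff _).mp h)
      rw [htake, hdropi]
      simp only [List.filter_cons, hkwb, Bool.not_false, if_neg Bool.false_ne_true]
      simp only [List.append_assoc, if_true]
      rfl

-- ===== VERDICT (by name: the statement is the Claim_ definition above) =====
theorem moveKeyworkToBack_spec : Claim_equal_moveKeyworkToBack := by
  intro inputList _
  unfold Spec_moveKeyworkToBack moveKeyworkToBack moveKeyworkToBack_alt
  have := loopA_spec inputList.length inputList [] 0 (by omega) (by omega)
  simpa using this
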